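-- pv_equiv track=rewrite | github.com/Sarah-qi/COMP9021 | Sample_Exam_Questions/practices/practice_3.py | justify_sequences
-- ===== SOURCE A (Python) =====
-- from itertools import combinations,permutations
--
-- def justify_sequences(l,n):
--     temp = []
--     for i in list(combinations(l,n)):
--         i = ''.join(i)
--         j = set(i)
--         if i not in temp and len(j) == len(i):
--             temp.append(i)
--     return temp
-- ===== SOURCE B (Python) =====
-- def justify_sequences(l, n):
--     found = []
--
--     def bt(start, k, prefix, used):
--         if k == 0:
--             found.append(prefix)
--             return
--         for j in range(start, len(l) - k + 1):
--             w = l[j]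
--             cs = set(w)
--             if len(cs) == len(w) and used.isdisjoint(cs):
--                 bt(j + 1, k - 1, prefix + w, used | cs)
--
--     bt(0, n, '', set())
--     return list(dict.fromkeys(found))
-- ===== Notes on version B (the rewrite author's own statement) =====
-- stated objective: alternative
-- what changed: Replaces A's generate-every-combination-then-filter-then-linear-list-dedup pipeline by a pruned depth-first backtracking search that never enters a subtree once the chosen words share a character (so invalid combinations are cut off early instead of generated and filtered), followed by a single ordered dedup pass via dict.fromkeys.
import Mathlib
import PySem

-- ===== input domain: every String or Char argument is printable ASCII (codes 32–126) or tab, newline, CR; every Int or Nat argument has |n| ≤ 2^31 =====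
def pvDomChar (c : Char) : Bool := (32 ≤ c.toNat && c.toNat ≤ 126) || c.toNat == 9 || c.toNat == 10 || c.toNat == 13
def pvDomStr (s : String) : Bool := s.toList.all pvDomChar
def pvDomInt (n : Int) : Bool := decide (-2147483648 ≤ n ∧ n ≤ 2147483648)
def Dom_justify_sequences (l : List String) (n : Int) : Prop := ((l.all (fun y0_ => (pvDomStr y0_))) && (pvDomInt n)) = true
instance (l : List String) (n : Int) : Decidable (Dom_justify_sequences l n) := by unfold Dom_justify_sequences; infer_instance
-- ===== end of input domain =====

-- B replaces A's generate-all-combinations, filter, linear-scan-dedup pipeline by a pruned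
-- backtracking search (subtrees whose chosen words already share a character are never entered)
-- followed by one ordered dedup pass (dict.fromkeys); objective: alternative.

-- ===== PORT A =====
-- itertools.combinations(l, n), in itertools' order, as tuples (lists) of the chosen elements
def pyCombos (k : Nat) (l : List String) : List (List String) :=
  match k, l with
  | 0, _ => [[]]
  | _ + 1, [] => []
  | k + 1, x :: xs => (pyCombos k xs).map (fun c => x :: c) ++ pyCombos (k + 1) xs

-- A raises ValueError for n < 0 (combinations); the port returns [] there, Pre_ excludes it
def justify_sequences (l : List String) (n : Int) : List String :=
  if n < 0 then [] else
  (pyCombos n.toNat l).foldl (fun temp c =>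
    let i := PySem.Str.join "" c
    let j := PySem.Set.ofList i.toList
    if i ∉ temp ∧ PySem.Set.len j = PySem.Str.len i then temp ++ [i] else temp) []

-- ===== PORT B =====
-- bt(start, k, prefix, used): depth-first choice of indices, pruned when the next word repeats a
-- character or one already used; 'found' is the accumulator list Source B appends to. The growing
-- Python string prefix is carried as its List Char and turned into a String when emitted.
def btB (l : List String) : Nat → Nat → List Char → PySem.Set Char → List String → List String
  | 0, _start, pre, _used, found => found ++ [String.ofList pre]
  | k + 1, start, pre, used, found =>
      -- range(start, len(l) - (k+1) + 1); Nat subtraction clamps exactly like an empty range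
      (List.range' start (l.length - k - start)).foldl
        (fun acc j =>
          let w := l.getD j ""          -- l[j], always in range here
          let cs := PySem.Set.ofList w.toList
          if PySem.Set.len cs = PySem.Str.len w ∧ PySem.Set.isdisjoint used cs
          then btB l k (j + 1) (pre ++ w.toList) (PySem.Set.union used cs) acc
          else acc)
        found

-- list(dict.fromkeys(found)) is PySem.List.dedup
def justify_sequences_alt (l : List String) (n : Int) : List String :=
  PySem.List.dedup (btB l n.toNat 0 [] PySem.Set.empty [])

-- ===== PRECONDITION & SPEC =====
-- Pre_ excludes n < 0, on which Python A raises ValueError (from itertools.combinations)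
def Pre_justify_sequences (l : List String) (n : Int) : Prop := 0 ≤ n
instance (l : List String) (n : Int) : Decidable (Pre_justify_sequences l n) := by
  unfold Pre_justify_sequences; infer_instance

def pvWitness_justify_sequences : List String × Int := (["ab", "a", "b", "c"], 2)

def Spec_justify_sequences (l : List String) (n : Int) (out : List String) : Prop := out = justify_sequences_alt l n
instance (l : List String) (n : Int) (out : List String) : Decidable (Spec_justify_sequences l n out) := by unfold Spec_justify_sequences; infer_instance

-- ===== CLAIM (what is proved, stated in full; the proofs are below) =====
def Claim_equal_justify_sequences : Prop := ∀ (l : List String) (n : Int), Dom_justify_sequences l n → Pre_justify_sequences l n → Spec_justify_sequences l n (justify_sequences l n)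

-- ===== LEMMAS AND PROOFS =====

-- characters of ''.join(c)
def jchars (c : List String) : List Char := (c.map String.toList).flatten

theorem toList_joinEmpty : ∀ c : List String, (PySem.Str.join "" c).toList = jchars c := by
  intro c
  induction c with
  | nil => simp [PySem.Str.toList_join, PySem.Chars.join_nil, jchars]
  | cons x rest ih =>
    cases rest with
    | nil => simp [PySem.Str.toList_join, PySem.Chars.join_singleton, jchars]
    | cons y r =>
      have h := ih
      simp only [PySem.Str.toList_join, List.map_cons] at h ⊢
      rw [PySem.Chars.join_cons_cons]
      simp only [jchars, List.map_cons, List.flatten_cons] at h ⊢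
      simpa using h

-- len(set(s)) == len(s) says exactly that the characters of s are pairwise distinct
theorem lenOfList_iff {α : Type} [DecidableEq α] (xs : List α) :
    (PySem.Set.ofList xs).length = xs.length ↔ xs.Nodup := by
  induction xs using List.reverseRecOn with
  | nil => simp
  | append_singleton xs x ih =>
    rw [PySem.Set.ofList_append_singleton, PySem.Set.add_eq_ite]
    have hle : (PySem.Set.ofList xs).length ≤ xs.length := PySem.Set.length_ofList_le xs
    by_cases hx : x ∈ PySem.Set.ofList xs
    · rw [if_pos hx]
      have hmem : x ∈ xs := (PySem.Set.mem_ofList xs x).mp hx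
      constructor
      · intro h
        exfalso
        simp only [List.length_append, List.length_cons, List.length_nil] at h
        omega
      · intro h
        exfalso
        rw [List.nodup_append] at h
        exact h.2.2 x hmem x (List.mem_singleton_self x) rfl
    · rw [if_neg hx]
      simp only [List.length_append, List.length_cons, List.length_nil]
      rw [List.nodup_append]
      constructor
      · intro h
        have hnd := ih.mp (by omega)
        refine ⟨hnd, List.nodup_singleton x, ?_⟩
        intro a ha b hb
        rw [List.mem_singleton] at hb; subst hb
        rintro rfl
        exact hx ((PySem.Set.mem_ofList xs a).mpr ha)
      · rintro ⟨hnd, -, -⟩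
        have := ih.mpr hnd; omega

theorem qA_iff (s : String) :
    (PySem.Set.len (PySem.Set.ofList s.toList) = PySem.Str.len s) ↔ s.toList.Nodup := by
  rw [show PySem.Set.len (PySem.Set.ofList s.toList)
        = ((PySem.Set.ofList s.toList).length : Int) from by simp [PySem.Set.len],
      show PySem.Str.len s = (s.toList.length : Int) from by simp [PySem.Str.len_eq],
      Nat.cast_inj]
  exact lenOfList_iff s.toList

-- A's loop: the membership-guarded append IS Set.add, so the loop is Set.update of the
-- all-distinct-characters combinations
theorem foldA_eq (cs : List (List String)) : ∀ temp : List String,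
    cs.foldl (fun temp c =>
        let i := PySem.Str.join "" c
        let j := PySem.Set.ofList i.toList
        if i ∉ temp ∧ PySem.Set.len j = PySem.Str.len i then temp ++ [i] else temp) temp
      = PySem.Set.update temp
          ((cs.filter (fun c => decide (jchars c).Nodup)).map (fun c => PySem.Str.join "" c)) := by
  induction cs with
  | nil => intro temp; simp [PySem.Set.update]
  | cons m rest ih =>
    intro temp
    by_cases hq : (jchars m).Nodup
    · have hnd : (PySem.Str.join "" m).toList.Nodup := by rw [toList_joinEmpty]; exact hq
      have hstep : (if PySem.Str.join "" m ∉ temp ∧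
            PySem.Set.len (PySem.Set.ofList (PySem.Str.join "" m).toList)
              = PySem.Str.len (PySem.Str.join "" m)
          then temp ++ [PySem.Str.join "" m] else temp)
          = PySem.Set.add temp (PySem.Str.join "" m) := by
        rw [PySem.Set.add_eq_ite]
        by_cases hm : PySem.Str.join "" m ∈ temp
        · rw [if_neg (by tauto), if_pos hm]
        · rw [if_pos ⟨hm, (qA_iff _).mpr hnd⟩, if_neg hm]
      simp only [List.foldl_cons, List.filter_cons, hq, decide_true, if_pos, List.map_cons]
      rw [hstep, PySem.Set.update_cons, ih]
    · have hstep : (if PySem.Str.join "" m ∉ temp ∧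
            PySem.Set.len (PySem.Set.ofList (PySem.Str.join "" m).toList)
              = PySem.Str.len (PySem.Str.join "" m)
          then temp ++ [PySem.Str.join "" m] else temp) = temp := by
        rw [if_neg]
        rintro ⟨-, h2⟩
        rw [qA_iff, toList_joinEmpty] at h2
        exact hq h2
      simp only [List.foldl_cons, List.filter_cons, hq, decide_false]
      rw [hstep, if_neg (by simp), ih]

-- combinations of the suffix l[start:], unrolled along Source B's index range
theorem pyCombos_short : ∀ (l : List String) (k : Nat), l.length < k → pyCombos k l = [] := by
  intro l
  induction l with
  | nil =>
    intro k h
    match k with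
    | k + 1 => rfl
  | cons x xs ih =>
    intro k h
    match k, h with
    | k + 1, h =>
      simp only [pyCombos]
      rw [ih k (by simp at h; omega), ih (k + 1) (by simp at h; omega)]
      simp

theorem combos_range (l : List String) (k : Nat) :
    ∀ (m start : Nat), l.length - start ≤ m →
    pyCombos (k + 1) (l.drop start)
      = (List.range' start (l.length - k - start)).flatMap
          (fun j => (pyCombos k (l.drop (j + 1))).map (fun c => l.getD j "" :: c)) := by
  intro m
  induction m with
  | zero =>
    intro start h
    rw [pyCombos_short _ _ (by simp; omega)]
    rw [show l.length - k - start = 0 by omega]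
    simp
  | succ m ih =>
    intro start h
    by_cases hlt : start < l.length - k
    · have hsl : start < l.length := by omega
      have hdrop : l.drop start = l[start] :: l.drop (start + 1) :=
        List.drop_eq_getElem_cons hsl
      rw [hdrop]
      simp only [pyCombos]
      rw [show l.length - k - start = (l.length - k - (start + 1)) + 1 by omega,
          List.range'_succ, List.flatMap_cons]
      rw [ih (start + 1) (by omega)]
      congr 1
      apply List.map_congr_left
      intro c _
      rw [List.getD_eq_getElem l "" hsl]
    · rw [pyCombos_short _ _ (by simp; omega)]
      rw [show l.length - k - start = 0 by omega]
      simp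

-- pruning is sound and complete: a skipped word can never extend to an all-distinct string,
-- an accepted word preserves the invariant (used = set of characters of the prefix)
theorem btB_spec (l : List String) : ∀ (k : Nat) (start : Nat) (pre : List Char)
    (used : PySem.Set Char) (found : List String),
    pre.Nodup → (∀ ch, ch ∈ used ↔ ch ∈ pre) →
    btB l k start pre used found
      = found ++ ((pyCombos k (l.drop start)).filter
            (fun c => decide (pre ++ jchars c).Nodup)).map
          (fun c => String.ofList (pre ++ jchars c)) := by
  intro k
  induction k with
  | zero =>
    intro start pre used found hnd _
    simp [btB, pyCombos, jchars, hnd]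
  | succ k ih =>
    intro start pre used found hnd hused
    simp only [btB]
    rw [combos_range l k (l.length - start) start (le_refl _),
        List.filter_flatMap, List.map_flatMap]
    have key : ∀ (js : List Nat) (acc : List String),
        js.foldl (fun acc j =>
          let w := l.getD j ""
          let cs := PySem.Set.ofList w.toList
          if PySem.Set.len cs = PySem.Str.len w ∧ PySem.Set.isdisjoint used cs
          then btB l k (j + 1) (pre ++ w.toList) (PySem.Set.union used cs) acc
          else acc) acc
        = acc ++ js.flatMap (fun j =>
            (((pyCombos k (l.drop (j + 1))).map (fun c => l.getD j "" :: c)).filter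
              (fun c => decide (pre ++ jchars c).Nodup)).map
            (fun c => String.ofList (pre ++ jchars c))) := by
      intro js
      induction js with
      | nil => intro acc; simp
      | cons j rest ihr =>
        intro acc
        simp only [List.foldl_cons, List.flatMap_cons]
        by_cases hcond : PySem.Set.len (PySem.Set.ofList (l.getD j "").toList)
              = PySem.Str.len (l.getD j "")
            ∧ PySem.Set.isdisjoint used (PySem.Set.ofList (l.getD j "").toList)
        · have hwnd : (l.getD j "").toList.Nodup := (qA_iff _).mp hcond.1
          have hdisj : ∀ a ∈ pre, ∀ b ∈ (l.getD j "").toList, a ≠ b := by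
            intro a ha b hb
            rintro rfl
            have h3 := (PySem.Set.isdisjoint_iff used (PySem.Set.ofList (l.getD j "").toList)).mp hcond.2
            exact h3 a ((hused a).mpr ha) ((PySem.Set.mem_ofList _ _).mpr hb)
          have hnd' : (pre ++ (l.getD j "").toList).Nodup := by
            rw [List.nodup_append]; exact ⟨hnd, hwnd, hdisj⟩
          have hused' : ∀ ch, ch ∈ PySem.Set.union used (PySem.Set.ofList (l.getD j "").toList)
              ↔ ch ∈ pre ++ (l.getD j "").toList := by
            intro ch
            rw [PySem.Set.mem_union, hused ch, List.mem_append, PySem.Set.mem_ofList]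
          simp only [if_pos hcond]
          rw [ih (j + 1) (pre ++ (l.getD j "").toList) _ acc hnd' hused', ihr,
              List.append_assoc]
          congr 2
          rw [List.filter_map, List.map_map]
          rw [List.filter_congr (by
            intro c _
            simp [Function.comp, jchars, List.append_assoc] : ∀ c ∈ pyCombos k (l.drop (j + 1)),
                ((fun c => decide (pre ++ jchars c).Nodup) ∘ (fun c => l.getD j "" :: c)) c
                  = (fun c => decide ((pre ++ (l.getD j "").toList) ++ jchars c).Nodup) c)]
          apply List.map_congr_left
          intro c _
          simp [Function.comp, jchars, List.append_assoc]
        · simp only [if_neg hcond]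
          rw [ihr]
          have hempty : ((pyCombos k (l.drop (j + 1))).map (fun c => l.getD j "" :: c)).filter
              (fun c => decide (pre ++ jchars c).Nodup) = [] := by
            rw [List.filter_eq_nil_iff]
            intro c hc
            rw [List.mem_map] at hc
            obtain ⟨c0, -, rfl⟩ := hc
            simp only [decide_eq_true_eq]
            intro habs
            apply hcond
            simp only [jchars, List.map_cons, List.flatten_cons, ← List.append_assoc] at habs
            rw [List.nodup_append] at habs
            obtain ⟨h2, -, -⟩ := habs
            rw [List.nodup_append] at h2
            refine ⟨(qA_iff _).mpr h2.2.1, ?_⟩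
            rw [PySem.Set.isdisjoint_iff]
            intro x hx
            rw [PySem.Set.mem_ofList]
            intro hmem
            exact h2.2.2 x ((hused x).mp hx) x hmem rfl
          rw [hempty]
          simp
    rw [key]

-- ===== VERDICT (by name: the statement is the Claim_ definition above) =====
theorem justify_sequences_spec : Claim_equal_justify_sequences := by
  intro l n _ hpre
  unfold Spec_justify_sequences justify_sequences justify_sequences_alt
  rw [if_neg (not_lt.mpr hpre)]
  rw [foldA_eq,
      btB_spec l n.toNat 0 [] PySem.Set.empty [] List.nodup_nil
        (by intro ch; simp [PySem.Set.empty]),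
      PySem.List.dedup_eq_ofList, PySem.Set.update_nil_left]
  simp only [List.drop_zero, List.nil_append]
  congr 1
  apply List.map_congr_left
  intro c _
  apply String.ext
  rw [toList_joinEmpty]
  simp
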